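-- pv_equiv track=rewrite | github.com/moshaik1/InterviewPrep | EPI_python/hash_sect/fewerThanTargetDistinct.py | fewerThanTargetDistincy
-- ===== SOURCE A (Python) =====
-- def fewerThanTargetDistincy(arr: list[int], target:int) -> bool:
--
--     counter = 0
--     numSet = set()
--
--     if not arr and target != 0:
--         return False
--     else:
--         for num in arr:
--             if num not in numSet:
--                 numSet.add(num)
--                 counter += 1
--
--             if counter >= target:
--                 return False
--
--     return True
-- ===== SOURCE B (Python) =====
-- def fewerThanTargetDistincy(arr: list[int], target: int) -> bool:
--     s = sorted(arr)
--     if not s: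
--         return 0 < target
--     d = 1
--     prev = s[0]
--     for x in s[1:]:
--         if x != prev:
--             d += 1
--         prev = x
--     return d < target
-- ===== Notes on version B (the rewrite author's own statement) =====
-- stated objective: alternative
-- what changed: Replaces the hash-set membership loop with early exit by sorting a copy and counting distinct values in one adjacent-comparison scan, then comparing the count with target.
-- intended difference: On an empty arr with target >= 0, A's special case returns True exactly when target == 0, the opposite of the distinct-count test; B returns 0 < target, comparing the true distinct count (0) with target as intended. — e.g. on fewerThanTargetDistincy([], 1): A returns false, B returns true
import Mathlib
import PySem

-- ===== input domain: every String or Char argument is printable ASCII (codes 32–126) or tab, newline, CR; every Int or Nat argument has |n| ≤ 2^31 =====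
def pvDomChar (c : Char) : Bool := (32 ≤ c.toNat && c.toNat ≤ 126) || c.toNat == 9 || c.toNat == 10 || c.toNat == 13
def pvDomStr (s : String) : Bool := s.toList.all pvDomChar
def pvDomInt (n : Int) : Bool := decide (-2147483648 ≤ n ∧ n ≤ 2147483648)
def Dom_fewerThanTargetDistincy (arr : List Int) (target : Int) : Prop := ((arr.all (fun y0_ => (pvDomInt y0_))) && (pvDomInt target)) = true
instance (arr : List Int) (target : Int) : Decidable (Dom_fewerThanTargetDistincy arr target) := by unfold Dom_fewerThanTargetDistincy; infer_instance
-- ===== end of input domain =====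

-- B replaces A's hash-set loop by a sort-then-adjacent-scan distinct count (alternative
-- decomposition, not claimed faster); on empty arr with target ≥ 0 B fixes A's inverted
-- special case (see D_ below).

-- ===== PORT A =====
-- the 'for num in arr' loop of A: state = (numSet, counter), early 'return False'
def pvALoop (target : Int) : List Int → PySem.Set Int → Int → Bool
  | [], _, _ => true
  | num :: rest, numSet, counter =>
    let st := if PySem.Set.contains numSet num then (numSet, counter)
              else (PySem.Set.add numSet num, counter + 1)
    if st.2 ≥ target then false else pvALoop target rest st.1 st.2

def fewerThanTargetDistincy (arr : List Int) (target : Int) : Bool :=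
  if arr = [] ∧ target ≠ 0 then false
  else pvALoop target arr PySem.Set.empty 0

-- ===== PORT B =====
-- the 'for x in s[1:]' loop of B: state = (prev, d)
def pvBScan : List Int → Int → Int → Int
  | [], _, d => d
  | x :: rest, prev, d => pvBScan rest x (if x ≠ prev then d + 1 else d)

def fewerThanTargetDistincy_alt (arr : List Int) (target : Int) : Bool :=
  match PySem.List.sorted arr (fun x => x) false with
  | [] => decide (0 < target)
  | s0 :: stail => decide (pvBScan stail s0 1 < target)

-- ===== PRECONDITION & SPEC =====
-- On empty arr with target ≥ 0, A's special case returns True exactly when target == 0 — the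
-- opposite of the distinct-count test; B returns 0 < target, comparing the true distinct
-- count (0) with target as intended.
def D_fewerThanTargetDistincy (arr : List Int) (target : Int) : Prop := arr = [] ∧ 0 ≤ target
instance (arr : List Int) (target : Int) : Decidable (D_fewerThanTargetDistincy arr target) := by unfold D_fewerThanTargetDistincy; infer_instance

def Spec_fewerThanTargetDistincy (arr : List Int) (target : Int) (out : Bool) : Prop := ¬ D_fewerThanTargetDistincy arr target → out = fewerThanTargetDistincy_alt arr target
instance (arr : List Int) (target : Int) (out : Bool) : Decidable (Spec_fewerThanTargetDistincy arr target out) := by unfold Spec_fewerThanTargetDistincy; infer_instance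

def pvDiffWitness_fewerThanTargetDistincy : List Int × Int := ([], 1)
def pvDiffWitnessOut_fewerThanTargetDistincy : Bool × Bool := (false, true)

-- ===== CLAIM (what is proved, stated in full; the proofs are below) =====
def Claim_unchanged_fewerThanTargetDistincy : Prop := ∀ (arr : List Int) (target : Int), Dom_fewerThanTargetDistincy arr target → Spec_fewerThanTargetDistincy arr target (fewerThanTargetDistincy arr target)
def Claim_changed_fewerThanTargetDistincy : Prop := Dom_fewerThanTargetDistincy (pvDiffWitness_fewerThanTargetDistincy.1) (pvDiffWitness_fewerThanTargetDistincy.2) ∧ D_fewerThanTargetDistincy (pvDiffWitness_fewerThanTargetDistincy.1) (pvDiffWitness_fewerThanTargetDistincy.2) ∧ fewerThanTargetDistincy (pvDiffWitness_fewerThanTargetDistincy.1) (pvDiffWitness_fewerThanTargetDistincy.2) = pvDiffWitnessOut_fewerThanTargetDistincy.1 ∧ fewerThanTargetDistincy_alt (pvDiffWitness_fewerThanTargetDistincy.1) (pvDiffWitness_fewerThanTargetDistincy.2) = pvDiffWitnessOut_fewerThanTargetDistincy.2 ∧ pvDiffWitnessOut_fewerThanTargetDistincy.1 ≠ pvDi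ffWitnessOut_fewerThanTargetDistincy.2
def Claim_exact_fewerThanTargetDistincy : Prop := ∀ (arr : List Int) (target : Int), Dom_fewerThanTargetDistincy arr target → D_fewerThanTargetDistincy arr target → fewerThanTargetDistincy arr target ≠ fewerThanTargetDistincy_alt arr target

-- ===== LEMMAS AND PROOFS =====

-- the number of NEW distinct elements A's loop will add to numSet
def pvNewCount : PySem.Set Int → List Int → Int
  | _, [] => 0
  | s, x :: xs => if PySem.Set.contains s x then pvNewCount s xs
                  else 1 + pvNewCount (PySem.Set.add s x) xs

theorem pvNewCount_nonneg (s : PySem.Set Int) (xs : List Int) : 0 ≤ pvNewCount s xs := by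
  induction xs generalizing s with
  | nil => simp [pvNewCount]
  | cons x xs ih =>
    simp only [pvNewCount]
    split
    · exact ih s
    · have := ih (PySem.Set.add s x); omega

theorem pvNewCount_card (s : PySem.Set Int) (xs : List Int) :
    pvNewCount s xs = ((xs.toFinset \ s.toFinset).card : Int) := by
  induction xs generalizing s with
  | nil => simp [pvNewCount]
  | cons x xs ih =>
    simp only [pvNewCount, List.toFinset_cons]
    by_cases hx : x ∈ s
    · rw [if_pos ((PySem.Set.contains_iff s x).mpr hx), ih s,
        Finset.insert_sdiff_of_mem _ (List.mem_toFinset.mpr hx)]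
    · rw [if_neg (by simpa using (fun h => hx ((PySem.Set.contains_iff s x).mp h))),
        ih (PySem.Set.add s x)]
      have hadd : (PySem.Set.add s x).toFinset = insert x s.toFinset := by
        show (if PySem.Set.contains s x then s else s ++ [x]).toFinset = _
        rw [if_neg (by simpa using (fun h => hx ((PySem.Set.contains_iff s x).mp h)))]
        ext y; simp
      rw [hadd]
      have h1 : insert x xs.toFinset \ s.toFinset = insert x (xs.toFinset \ insert x s.toFinset) := by
        ext y
        simp only [Finset.mem_sdiff, Finset.mem_insert, List.mem_toFinset]
        constructor
        · rintro ⟨hy1, hy2⟩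
          rcases hy1 with rfl | hy1
          · left; rfl
          · by_cases hyx : y = x
            · left; exact hyx
            · right; exact ⟨hy1, by tauto⟩
        · rintro (rfl | ⟨hy1, hy2⟩)
          · exact ⟨Or.inl rfl, fun h => hx h⟩
          · exact ⟨Or.inr hy1, fun h => hy2 (Or.inr h)⟩
      rw [h1, Finset.card_insert_of_notMem (by simp)]
      push_cast; ring

theorem pvALoop_eq (target : Int) (rest : List Int) (s : PySem.Set Int) (counter : Int)
    (hne : rest ≠ []) :
    pvALoop target rest s counter = decide (counter + pvNewCount s rest < target) := by
  induction rest generalizing s counter with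
  | nil => exact absurd rfl hne
  | cons num rest ih =>
    by_cases hmem : PySem.Set.contains s num = true
    · have hN : pvNewCount s (num :: rest) = pvNewCount s rest := by
        rw [show pvNewCount s (num :: rest) = if PySem.Set.contains s num = true then pvNewCount s rest else 1 + pvNewCount (PySem.Set.add s num) rest from rfl, if_pos hmem]
      simp only [hN, pvALoop, hmem, if_true]
      by_cases hge : counter ≥ target
      · rw [if_pos hge]
        have := pvNewCount_nonneg s rest
        simp; omega
      · rw [if_neg hge]
        cases rest with
        | nil => simp only [pvALoop, pvNewCount]; simp; omega
        | cons b bs => rw [ih s counter (by simp)]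
    · have hN : pvNewCount s (num :: rest) = 1 + pvNewCount (PySem.Set.add s num) rest := by
        rw [show pvNewCount s (num :: rest) = if PySem.Set.contains s num = true then pvNewCount s rest else 1 + pvNewCount (PySem.Set.add s num) rest from rfl, if_neg hmem]
      simp only [hN, pvALoop, hmem, if_false, Bool.false_eq_true]
      by_cases hge : counter + 1 ≥ target
      · rw [if_pos hge]
        have := pvNewCount_nonneg (PySem.Set.add s num) rest
        simp; omega
      · rw [if_neg hge]
        cases rest with
        | nil => simp only [pvALoop, pvNewCount]; simp; omega
        | cons b bs =>
          rw [ih (PySem.Set.add s num) (counter + 1) (by simp)]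
          simp only [decide_eq_decide]; omega

theorem pvBScan_card (l : List Int) (prev d : Int)
    (h : (prev :: l).Pairwise (· ≤ ·)) :
    pvBScan l prev d = d + (((prev :: l).toFinset.card : Int)) - 1 := by
  induction l generalizing prev d with
  | nil => simp [pvBScan]
  | cons x rest ih =>
    simp only [pvBScan]
    rcases List.pairwise_cons.mp h with ⟨hprev, hxr⟩
    by_cases hxp : x = prev
    · subst hxp
      rw [if_neg (by simp), ih x d hxr]
      simp
    · rw [if_pos (by simpa using hxp), ih x (d + 1) hxr]
      have hlt : prev < x := lt_of_le_of_ne (hprev x (by simp)) (fun h => hxp h.symm)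
      have hnm : prev ∉ (x :: rest).toFinset := by
        simp only [List.toFinset_cons, Finset.mem_insert, List.mem_toFinset]
        rintro (rfl | hmem)
        · exact absurd rfl (ne_of_lt hlt)
        · rcases List.pairwise_cons.mp hxr with ⟨hx, -⟩
          have := hx prev hmem
          omega
      rw [show ((prev :: x :: rest).toFinset) = insert prev ((x :: rest).toFinset) by simp,
        Finset.card_insert_of_notMem hnm]
      push_cast; ring

theorem pvA_nonempty (a : Int) (l : List Int) (target : Int) :
    fewerThanTargetDistincy (a :: l) target = decide (((a :: l).toFinset.card : Int) < target) := by
  unfold fewerThanTargetDistincy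
  rw [if_neg (by simp)]
  rw [pvALoop_eq target (a :: l) PySem.Set.empty 0 (by simp), pvNewCount_card]
  simp [PySem.Set.empty]

theorem pvB_nonempty (a : Int) (l : List Int) (target : Int) :
    fewerThanTargetDistincy_alt (a :: l) target = decide (((a :: l).toFinset.card : Int) < target) := by
  unfold fewerThanTargetDistincy_alt
  rcases hs : PySem.List.sorted (a :: l) (fun x => x) false with _ | ⟨s0, st⟩
  · have : ((a : Int) :: l).Perm [] := hs ▸ (PySem.List.sorted_perm (a :: l) (fun x => x) false).symm
    simpa using this.length_eq
  · have hperm : (s0 :: st).Perm (a :: l) := hs ▸ PySem.List.sorted_perm (a :: l) (fun x => x) false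
    have hpw : (s0 :: st).Pairwise (· ≤ ·) := by
      have := PySem.List.sorted_pairwise (xs := a :: l) (key := fun x => x)
      rw [hs] at this; exact this
    show decide (pvBScan st s0 1 < target) = _
    rw [pvBScan_card st s0 1 hpw, List.toFinset_eq_of_perm _ _ hperm]
    simp only [decide_eq_decide]; omega

-- ===== VERDICT (by name: the statement is the Claim_ definition above) =====
theorem fewerThanTargetDistincy_spec : Claim_unchanged_fewerThanTargetDistincy := by
  intro arr target _ hnd
  cases arr with
  | nil =>
    have ht : target < 0 := by
      by_contra h
      exact hnd ⟨rfl, by omega⟩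
    unfold fewerThanTargetDistincy fewerThanTargetDistincy_alt
    rw [if_pos ⟨rfl, by omega⟩]
    show false = decide (0 < target)
    simp; omega
  | cons a l => rw [pvA_nonempty, pvB_nonempty]

theorem fewerThanTargetDistincy_changed : Claim_changed_fewerThanTargetDistincy := by
  unfold Claim_changed_fewerThanTargetDistincy; decide

theorem fewerThanTargetDistincy_tight : Claim_exact_fewerThanTargetDistincy := by
  intro arr target _ hd
  rcases hd with ⟨rfl, ht⟩
  unfold fewerThanTargetDistincy fewerThanTargetDistincy_alt
  by_cases h0 : target = 0
  · subst h0; decide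
  · rw [if_pos ⟨rfl, h0⟩]
    show false ≠ decide (0 < target)
    simp; omega
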